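-- pv_equiv track=rewrite | github.com/Gui-FernandesBR/MAC2166-2018 | EP3/ep3.py | calcula_id
-- ===== SOURCE A (Python) =====
-- def calcula_id(matriz):
--     """ Retorna o valor de identificação de uma matriz computada pelo
--     algoritmo adler32
--
--     A função :func:'calcula_id' computa um identificador para uma matriz
--     usando a seguinte versão adaptada do algoritmo de espalhamento Adler32:
--
--         - A = 1 + matriz[0][0] + matriz[0][1] +...+ matriz[m-1][n-1] MOD 65521,
--             onde m é o número de linhas e n é o número de colunas da matriz
--         - B = (1 + matriz[0][0]) + (1 + matriz[0][0]+matriz[0][1]) + ... +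
--           (1 + matriz[0][0] + matriz[0][1] + ... + matriz[m-1][n-1]) MOD 65521
--         - retorna B * (2**16) + A
--
--
--     :param matriz: Uma matriz de inteiros
--     :type matriz: <class 'list'>
--     :return identificador: O identificador inteiro da matriz computado segundo
--         a nossa versão adaptada do Adler32
--     :rtype: <class 'int'>
--
--     :Examples:
--
--     >>> matriz_A = [[0,1,2], [3,4,5]]
--     >>> matriz_B = [[3,4,5], [0,1,2]]
--     >>> matriz_C = [[0,1], [1,0]]
--     >>> matriz_D = [[1,0,2], [3,4,5]]
--     >>> calcula_id(matriz_A)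
--     2686992
--     >>> calcula_id(matriz_B)
--     4456464
--     >>> calcula_id(matriz_C)
--     589827
--     >>> calcula_id(matriz_D)
--     2752528
--
--     .. seealso::
--         Consulte o enunciado para um exemplo mais detalhado.
--     """
--     n_linhas = len(matriz)
--     n_colunas= len(matriz[0])
--     ### valores iniciais das somas que serao usadas para encontrar A e B ###
--     soma_A = 1
--     soma_B = n_linhas * n_colunas
--     ### Agora vamos para a parte boa ###
--     k= n_linhas * n_colunas
--     for i in range (n_linhas):
--         for j in range(n_colunas):
--             soma_A += matriz[i][j]
--             soma_B += k * matriz[i][j]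
--             k=k-1
--     A = soma_A % 65521
--     B = soma_B % 65521
--     ### Falta somente fazer o retorno ###
--     C = (B*(2**16))+A
--     return C
-- ===== SOURCE B (Python) =====
-- def calcula_id(matriz):
--     """Flatten-then-prefix-sum formulation: the value's weighted sum
--     (descending coefficients) equals N plus the sum of all running prefix
--     sums of the flattened matrix, so B is computed from the prefix sums."""
--     n_colunas = len(matriz[0])
--     vals = [matriz[i][j] for i in range(len(matriz)) for j in range(n_colunas)]
--     A = (1 + sum(vals)) % 65521
--     total = 0
--     prefixes = []
--     for v in vals:
--         total += v
--         prefixes.append(total)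
--     B = (len(vals) + sum(prefixes)) % 65521
--     return B * 65536 + A
-- ===== Notes on version B (the rewrite author's own statement) =====
-- stated objective: alternative
-- what changed: Instead of A's nested index loops maintaining three accumulators with a descending counter k, B first flattens the matrix into one value list, then computes A from its plain sum and B as len(vals) plus the sum of the running prefix sums (the descending-coefficient weighted sum equals the sum of prefix sums).
import Mathlib
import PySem

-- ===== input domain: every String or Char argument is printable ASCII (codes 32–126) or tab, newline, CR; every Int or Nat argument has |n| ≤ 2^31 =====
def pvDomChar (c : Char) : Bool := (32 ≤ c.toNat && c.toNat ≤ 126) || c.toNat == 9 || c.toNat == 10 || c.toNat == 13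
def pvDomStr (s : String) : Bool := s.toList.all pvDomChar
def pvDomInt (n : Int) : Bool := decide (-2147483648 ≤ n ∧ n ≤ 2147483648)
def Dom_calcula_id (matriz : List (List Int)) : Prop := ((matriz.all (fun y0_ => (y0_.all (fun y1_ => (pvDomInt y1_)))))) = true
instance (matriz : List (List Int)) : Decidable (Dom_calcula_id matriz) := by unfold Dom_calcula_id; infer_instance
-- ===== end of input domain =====

-- B flattens the matrix and computes the weighted sum as N plus the sum of
-- running prefix sums (alternative decomposition; same cost).

-- ===== PORT A =====
def calcula_id (matriz : List (List Int)) : Int :=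
  let n_linhas : Int := matriz.length
  let n_colunas : Int := (PySem.List.pyGetD matriz 0 []).length
  let st :=
    (PySem.List.pyRange 0 n_linhas 1).foldl (fun st i =>
      (PySem.List.pyRange 0 n_colunas 1).foldl (fun (st : Int × Int × Int) j =>
        (st.1 + PySem.List.pyGetD (PySem.List.pyGetD matriz i []) j 0,
         st.2.1 + st.2.2 * PySem.List.pyGetD (PySem.List.pyGetD matriz i []) j 0,
         st.2.2 - 1)) st)
      (1, n_linhas * n_colunas, n_linhas * n_colunas)
  let A := PySem.Int.mod st.1 65521
  let B := PySem.Int.mod st.2.1 65521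
  B * 2 ^ 16 + A

-- ===== PORT B =====
def calcula_id_alt (matriz : List (List Int)) : Int :=
  let n_colunas : Int := (PySem.List.pyGetD matriz 0 []).length
  let vals : List Int :=
    (PySem.List.pyRange 0 (matriz.length : Int) 1).flatMap (fun i =>
      (PySem.List.pyRange 0 n_colunas 1).map (fun j =>
        PySem.List.pyGetD (PySem.List.pyGetD matriz i []) j 0))
  let A := PySem.Int.mod (1 + vals.sum) 65521
  let pref := vals.foldl (fun (st : Int × List Int) v => (st.1 + v, st.2 ++ [st.1 + v])) (0, [])
  let B := PySem.Int.mod ((vals.length : Int) + pref.2.sum) 65521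
  B * 65536 + A

-- ===== PRECONDITION & SPEC =====
-- Pre_ excludes exactly the inputs where the Python A raises IndexError:
-- the empty matrix (matriz[0]) and matrices whose later rows are shorter
-- than row 0 (matriz[i][j] for j < len(matriz[0])). B raises there too.
def Pre_calcula_id (matriz : List (List Int)) : Prop :=
  matriz ≠ [] ∧ ∀ row ∈ matriz, (matriz.headD []).length ≤ row.length
instance (matriz : List (List Int)) : Decidable (Pre_calcula_id matriz) := by
  unfold Pre_calcula_id; infer_instance
def pvWitness_calcula_id : List (List Int) := [[0, 1, 2], [3, 4, 5]]
def Spec_calcula_id (matriz : List (List Int)) (out : Int) : Prop := out = calcula_id_alt matriz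
instance (matriz : List (List Int)) (out : Int) : Decidable (Spec_calcula_id matriz out) := by unfold Spec_calcula_id; infer_instance

-- ===== CLAIM (what is proved, stated in full; the proofs are below) =====
def Claim_equal_calcula_id : Prop := ∀ (matriz : List (List Int)), Dom_calcula_id matriz → Pre_calcula_id matriz → Spec_calcula_id matriz (calcula_id matriz)

-- ===== LEMMAS AND PROOFS =====

-- weighted tail sum: wsum [x0,…,x(N-1)] = Σ t * x_t
def pvWsum : List Int → Int
  | [] => 0
  | _ :: xs => pvWsum xs + xs.sum

-- A's triple fold in closed form over an arbitrary value list.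
theorem pvTripFold (l : List Int) (a b k : Int) :
    l.foldl (fun (s : Int × Int × Int) v =>
        (s.1 + v, s.2.1 + s.2.2 * v, s.2.2 - 1)) (a, b, k)
    = (a + l.sum, b + k * l.sum - pvWsum l, k - l.length) := by
  induction l generalizing a b k with
  | nil => simp [pvWsum]
  | cons x xs ih =>
    simp only [List.foldl_cons, ih, pvWsum, List.sum_cons, List.length_cons]
    refine Prod.ext ?_ (Prod.ext ?_ ?_) <;> push_cast <;> ring

-- B's prefix-sum fold in closed form: sum of prefixes = N·Σ − wsum.
theorem pvPrefFold (l : List Int) (p : Int) (acc : List Int) :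
    (l.foldl (fun (st : Int × List Int) v => (st.1 + v, st.2 ++ [st.1 + v])) (p, acc)).2.sum
    = acc.sum + l.length * p + l.length * l.sum - pvWsum l := by
  induction l generalizing p acc with
  | nil => simp [pvWsum]
  | cons x xs ih =>
    simp only [List.foldl_cons, ih, pvWsum, List.sum_cons, List.sum_append,
      List.length_cons, List.sum_nil]
    push_cast; ring

-- the nested fold over the index ranges is the fold over the flattened list
theorem pvNestedFlat (l1 l2 : List Int) (f : Int → Int → Int) (init : Int × Int × Int) :
    l1.foldl (fun s i => l2.foldl (fun (s : Int × Int × Int) j =>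
        (s.1 + f i j, s.2.1 + s.2.2 * f i j, s.2.2 - 1)) s) init
    = (l1.flatMap (fun i => l2.map (f i))).foldl
        (fun (s : Int × Int × Int) v => (s.1 + v, s.2.1 + s.2.2 * v, s.2.2 - 1)) init := by
  induction l1 generalizing init with
  | nil => simp
  | cons i l1 ih => simp [List.foldl_map, ih]

-- ===== VERDICT (by name: the statement is the Claim_ definition above) =====
theorem calcula_id_spec : Claim_equal_calcula_id := by
  intro matriz _ _
  unfold Spec_calcula_id
  simp only [calcula_id, calcula_id_alt]
  rw [pvNestedFlat]
  set vals := ((PySem.List.pyRange 0 (matriz.length : Int) 1).flatMap fun i =>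
      (PySem.List.pyRange 0 ((PySem.List.pyGetD matriz 0 []).length : Int) 1).map fun j =>
        PySem.List.pyGetD (PySem.List.pyGetD matriz i []) j 0) with hvals
  rw [pvTripFold, pvPrefFold]
  have hlen : (vals.length : Int)
      = (matriz.length : Int) * ((PySem.List.pyGetD matriz 0 []).length : Int) := by
    simp [hvals, List.length_flatMap, PySem.List.length_pyRange_one]
  simp only [List.sum_nil]
  rw [← hlen]
  ring_nf
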